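-- pv_equiv track=rewrite | github.com/shrey199325/LeetCodeSolution | LeetCode/InterviewQuestions/scene_divide.py | uniqueSceneLength
-- ===== SOURCE A (Python) =====
-- from typing import List, Set
--
-- def uniqueSceneLength(A: List[str]) -> List[int]:
--     ans: List[int] = []
--     prev_index: int = 0
--     scene_map: Set[str] = set()
--     for ind, i in enumerate(A):
--         if i in scene_map:
--             ans.append(ind - prev_index)
--             scene_map.clear()
--             scene_map.add(i)
--             prev_index = ind
--         else:
--             scene_map.add(i)
--     ans.append(len(A) - prev_index)
--     return ans
-- ===== SOURCE B (Python) =====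
-- from typing import List
--
-- def uniqueSceneLength(A: List[str]) -> List[int]:
--     # Segment-by-segment: compute the longest all-distinct prefix of the
--     # remaining list, emit its length, cut it off, repeat.
--     def distinct_prefix_len(rest: List[str]) -> int:
--         k = 0
--         while k < len(rest) and rest[k] not in rest[:k]:
--             k += 1
--         return k
--
--     ans: List[int] = []
--     rest = A
--     while True:
--         k = distinct_prefix_len(rest)
--         if k == len(rest):
--             ans.append(k)
--             return ans
--         ans.append(k)
--         rest = rest[k:]
-- ===== Notes on version B (the rewrite author's own statement) =====
-- stated objective: alternative
-- what changed: Replaces A's single indexed pass with a cleared set by a staged, segment-by-segment decomposition: repeatedly compute the longest all-distinct prefix of the remaining list (membership test against the scanned prefix, no set), emit its length and slice it off; A's prev_index/scene_map bookkeeping disappears.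
import Mathlib
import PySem

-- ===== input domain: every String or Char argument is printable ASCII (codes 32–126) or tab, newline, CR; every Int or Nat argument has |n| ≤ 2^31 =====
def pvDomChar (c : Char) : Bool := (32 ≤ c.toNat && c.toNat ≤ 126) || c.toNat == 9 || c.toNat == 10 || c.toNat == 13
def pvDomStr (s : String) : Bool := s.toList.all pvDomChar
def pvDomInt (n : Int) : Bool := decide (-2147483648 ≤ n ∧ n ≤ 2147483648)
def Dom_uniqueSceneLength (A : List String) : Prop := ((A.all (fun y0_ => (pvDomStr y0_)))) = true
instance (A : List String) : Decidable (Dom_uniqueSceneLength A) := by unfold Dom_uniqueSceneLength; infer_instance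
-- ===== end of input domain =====

-- B restructures A's single indexed pass (cleared set + prev_index) into a staged
-- segment-by-segment decomposition: repeatedly take the longest all-distinct prefix of the
-- remaining list, emit its length, slice it off; objective: alternative (not faster).

-- ===== PORT A =====
-- loop body of A: state = (ans, prev_index, scene_map)
def sceneStepA (st : List Int × Int × PySem.Set String) (p : Int × String) :
    List Int × Int × PySem.Set String :=
  if PySem.Set.contains st.2.2 p.2 then
    (st.1 ++ [p.1 - st.2.1], p.1, PySem.Set.add PySem.Set.empty p.2)  -- clear(); add(i)
  else
    (st.1, st.2.1, PySem.Set.add st.2.2 p.2)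

def uniqueSceneLength (A : List String) : List Int :=
  let st := (PySem.List.enumerate A 0).foldl sceneStepA ([], 0, PySem.Set.empty)
  st.1 ++ [(A.length : Int) - st.2.1]

-- ===== PORT B =====
-- distinct_prefix_len's scan: pre = rest[:k] (the already-scanned prefix), xs = rest[k:]
def dplGo (pre : List String) (xs : List String) : Nat :=
  match xs with
  | [] => 0
  | x :: t => if pre.contains x then 0 else 1 + dplGo (pre ++ [x]) t

-- distinct_prefix_len(rest)
def distinctPrefixLen (rest : List String) : Nat := dplGo [] rest

theorem distinctPrefixLen_pos (x : String) (t : List String) :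
    1 ≤ distinctPrefixLen (x :: t) := by
  simp [distinctPrefixLen, dplGo]

-- B's main loop over the shrinking remainder
def uniqueSceneLength_alt (rest : List String) : List Int :=
  let k := distinctPrefixLen rest
  if k = rest.length then [(k : Int)]
  else (k : Int) :: uniqueSceneLength_alt (rest.drop k)
termination_by rest.length
decreasing_by
  rename_i h
  cases rest with
  | nil => exact absurd rfl h
  | cons x t =>
    have h1 := distinctPrefixLen_pos x t
    simp only [List.length_drop, List.length_cons]
    omega

-- ===== PRECONDITION & SPEC =====
def Spec_uniqueSceneLength (A : List String) (out : List Int) : Prop := out = uniqueSceneLength_alt A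
instance (A : List String) (out : List Int) : Decidable (Spec_uniqueSceneLength A out) := by unfold Spec_uniqueSceneLength; infer_instance

-- ===== CLAIM (what is proved, stated in full; the proofs are below) =====
def Claim_equal_uniqueSceneLength : Prop := ∀ (A : List String), Dom_uniqueSceneLength A → Spec_uniqueSceneLength A (uniqueSceneLength A)

-- ===== LEMMAS AND PROOFS =====

-- Generalized B-side value for the middle of a segment: 'pre' elements are already seen,
-- 'c' is the length of the current segment consumed so far.
def segGo (pre : List String) (xs : List String) (c : Int) : List Int :=
  let k := dplGo pre xs
  if k = xs.length then [c + (k : Int)]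
  else (c + (k : Int)) :: uniqueSceneLength_alt (xs.drop k)

theorem not_mem_of_contains_false {pre : List String} {x : String}
    (hx : pre.contains x = false) : x ∉ pre := by
  intro h
  rw [List.contains_iff_mem.mpr h] at hx
  exact Bool.true_eq_false.mp hx

theorem dplGo_cons_fresh (pre : List String) (x : String) (t : List String)
    (hx : pre.contains x = false) :
    dplGo pre (x :: t) = 1 + dplGo (pre ++ [x]) t := by
  simp [dplGo, not_mem_of_contains_false hx]

theorem drop_one_add (x : String) (t : List String) (m : Nat) :
    (x :: t).drop (1 + m) = t.drop m := by
  rw [Nat.add_comm]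
  simp [List.drop_succ_cons]

theorem segGo_step (pre : List String) (x : String) (t : List String) (c : Int)
    (hx : pre.contains x = false) :
    segGo pre (x :: t) c = segGo (pre ++ [x]) t (c + 1) := by
  unfold segGo
  rw [dplGo_cons_fresh pre x t hx]
  by_cases h : dplGo (pre ++ [x]) t = t.length
  · rw [if_pos (by simp [h, Nat.add_comm]), if_pos h]
    have : (c + ((1 + dplGo (pre ++ [x]) t : Nat) : Int)) = c + 1 + (dplGo (pre ++ [x]) t : Int) := by
      push_cast
      ring
    rw [this]
  · rw [if_neg (by simp; omega), if_neg h, drop_one_add]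
    have : (c + ((1 + dplGo (pre ++ [x]) t : Nat) : Int)) = c + 1 + (dplGo (pre ++ [x]) t : Int) := by
      push_cast
      ring
    rw [this]

theorem segGo_restart (x : String) (t : List String) :
    segGo [x] t 1 = uniqueSceneLength_alt (x :: t) := by
  rw [uniqueSceneLength_alt]
  unfold segGo
  have hdef : distinctPrefixLen (x :: t) = 1 + dplGo [x] t := by
    simp [distinctPrefixLen, dplGo]
  rw [hdef]
  have hcast : ((1 + dplGo [x] t : Nat) : Int) = 1 + (dplGo [x] t : Int) := by
    push_cast
    ring
  by_cases h : dplGo [x] t = t.length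
  · rw [if_pos h, if_pos (by simp [h, Nat.add_comm]), hcast]
  · rw [if_neg h, if_neg (by simp; omega), hcast, drop_one_add]

-- Main invariant: running A's loop from the middle of a segment (scene_map ↔ pre,
-- s - prev = elements of the current segment consumed so far) gives ans ++ segGo pre xs (s - prev).
theorem scene_loop_eq (xs : List String) (s prev : Int) (ans : List Int)
    (sm : PySem.Set String) (pre : List String)
    (hmem : ∀ y : String, PySem.Set.contains sm y = pre.contains y) :
    (let st := (PySem.List.enumerate xs s).foldl sceneStepA (ans, prev, sm)
     st.1 ++ [(s + (xs.length : Int)) - st.2.1]) = ans ++ segGo pre xs (s - prev) := by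
  induction xs generalizing s prev ans sm pre with
  | nil =>
    simp [PySem.List.enumerate_nil, segGo, dplGo]
  | cons x t ih =>
    rw [PySem.List.enumerate_cons]
    simp only [List.foldl_cons]
    have hlen : s + (((x :: t).length : Nat) : Int) = (s + 1) + (t.length : Int) := by
      rw [List.length_cons]
      push_cast
      ring
    by_cases hx : pre.contains x = true
    · -- duplicate: A splits; B's dplGo returns 0
      have hxs : x ∈ sm := (PySem.Set.contains_iff _ _).mp (by rw [hmem]; exact hx)
      have hA : sceneStepA (ans, prev, sm) (s, x)
          = (ans ++ [s - prev], s, PySem.Set.add PySem.Set.empty x) := by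
        simp [sceneStepA, hxs]
      rw [hA]
      have hsm' : ∀ y : String, PySem.Set.contains (PySem.Set.add PySem.Set.empty x) y
          = ([x] : List String).contains y := by
        intro y
        rw [Bool.eq_iff_iff, PySem.Set.contains_iff, PySem.Set.mem_add, List.contains_iff_mem]
        simp [PySem.Set.empty]
      have hrec := ih (s + 1) s (ans ++ [s - prev]) (PySem.Set.add PySem.Set.empty x) [x] hsm'
      simp only at hrec
      rw [hlen, hrec, show s + 1 - s = (1 : Int) by ring, segGo_restart]
      have hseg : segGo pre (x :: t) (s - prev)
          = (s - prev) :: uniqueSceneLength_alt (x :: t) := by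
        unfold segGo
        have h0 : dplGo pre (x :: t) = 0 := by
          simp [dplGo, List.contains_iff_mem.mp hx]
        rw [h0, if_neg (by simp), List.drop_zero]
        simp
      rw [hseg]
      simp
    · -- fresh element: both sides extend the prefix
      have hxf : pre.contains x = false := by
        cases h : pre.contains x
        · rfl
        · exact absurd h hx
      have hxs : x ∉ sm := fun h => by
        have := (PySem.Set.contains_iff sm x).mpr h
        rw [hmem, hxf] at this
        exact Bool.false_ne_true this
      have hA : sceneStepA (ans, prev, sm) (s, x)
          = (ans, prev, PySem.Set.add sm x) := by
        simp [sceneStepA, hxs]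
      rw [hA]
      have hpre : ∀ y : String, y ∈ sm ↔ y ∈ pre := by
        intro y
        rw [← PySem.Set.contains_iff, hmem, List.contains_iff_mem]
      have hsm' : ∀ y : String, PySem.Set.contains (PySem.Set.add sm x) y
          = (pre ++ [x]).contains y := by
        intro y
        rw [Bool.eq_iff_iff, PySem.Set.contains_iff, PySem.Set.mem_add, List.contains_iff_mem]
        simp [List.mem_append, hpre y]
      have hrec := ih (s + 1) prev ans (PySem.Set.add sm x) (pre ++ [x]) hsm'
      simp only at hrec
      rw [hlen, hrec, show s + 1 - prev = (s - prev) + 1 by ring,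
        ← segGo_step pre x t _ hxf]

-- ===== VERDICT (by name: the statement is the Claim_ definition above) =====
theorem uniqueSceneLength_spec : Claim_equal_uniqueSceneLength := by
  intro A _
  unfold Spec_uniqueSceneLength uniqueSceneLength
  have h := scene_loop_eq A 0 0 [] PySem.Set.empty []
    (by intro y; simp [PySem.Set.empty, PySem.Set.contains])
  simp only [zero_add, sub_zero] at h
  rw [h]
  unfold segGo
  rw [uniqueSceneLength_alt]
  simp [distinctPrefixLen]
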